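-- pv_equiv track=rewrite | github.com/manwar/perlweeklychallenge-club | challenge-265/packy-anderson/python/ch-2.py | completingWord
-- ===== SOURCE A (Python) =====
-- from collections import Counter
--
-- def letterCounts(strVal):
--   counts = Counter()
--   for c in strVal.lower():
--     if c.isalpha():
--       counts[c] += 1
--   return counts
--
-- def completingWord(targetStr, candidateStrs):
--   targetCounts = letterCounts(targetStr)
--   shortest = None
--   for s in candidateStrs:
--     candidateCounts = letterCounts(s)
--     isCandidate = True
--     for c, i in targetCounts.items():
--       #    this letter does not exist
--       if ( not c in candidateCounts
--            or # occurs fewer times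
--            candidateCounts[c] < i):
--          isCandidate = False
--     if (isCandidate and
--         (shortest is None or len(s) < len(shortest))):
--       shortest = s
--   return shortest if shortest is not None else ''
-- ===== SOURCE B (Python) =====
-- from collections import Counter
--
-- def letterCounts(strVal):
--   return Counter(c for c in strVal.lower() if c.isalpha())
--
-- def completingWord(targetStr, candidateStrs):
--   targetCounts = letterCounts(targetStr)
--   for s in sorted(candidateStrs, key=len):
--     candidateCounts = letterCounts(s)
--     if all(candidateCounts[c] >= i for c, i in targetCounts.items()):
--       return s
--   return ''
-- ===== Notes on version B (the rewrite author's own statement) =====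
-- stated objective: alternative
-- what changed: B replaces A's single-pass shortest-tracking loop (with a flag-accumulating inner items loop) by a stable length-sort of the candidates followed by an early-return scan for the first candidate whose Counter covers the target's; coverage is tested with all(...) instead of a flag loop.
import Mathlib
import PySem

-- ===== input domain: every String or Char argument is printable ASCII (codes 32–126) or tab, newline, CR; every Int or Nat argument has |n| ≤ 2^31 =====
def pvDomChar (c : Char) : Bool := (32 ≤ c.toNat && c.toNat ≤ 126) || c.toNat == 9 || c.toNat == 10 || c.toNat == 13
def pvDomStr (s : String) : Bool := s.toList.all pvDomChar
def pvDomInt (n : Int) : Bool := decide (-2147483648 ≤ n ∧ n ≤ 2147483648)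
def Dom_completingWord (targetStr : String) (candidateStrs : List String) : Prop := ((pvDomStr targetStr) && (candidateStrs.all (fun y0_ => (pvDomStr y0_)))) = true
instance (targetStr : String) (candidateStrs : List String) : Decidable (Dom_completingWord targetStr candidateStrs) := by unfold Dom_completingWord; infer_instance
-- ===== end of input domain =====

-- B sorts the candidates stably by length and returns the first covering one, instead of
-- A's single pass that tracks the strictly-shortest covering candidate (alternative decomposition).

-- ===== PORT A =====
-- letterCounts: Counter() filled by a loop over strVal.lower(), counting alphabetic chars
def letterCountsA (strVal : String) : PySem.Dict Char Int :=
  (PySem.Str.lower strVal).toList.foldl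
    (fun counts c =>
      if PySem.Str.isalpha c then counts.modify c 0 (fun x => x + 1) else counts)
    PySem.Dict.empty

def completingWord (targetStr : String) (candidateStrs : List String) : String :=
  let targetCounts := letterCountsA targetStr
  let shortest := candidateStrs.foldl
    (fun shortest s =>
      let candidateCounts := letterCountsA s
      let isCandidate := targetCounts.items.foldl
        (fun isCandidate p =>
          if !(candidateCounts.contains p.1) || candidateCounts.getD p.1 0 < p.2 then
            false
          else isCandidate)
        true
      if isCandidate &&
          (match shortest with
           | none => true
           | some m => decide (PySem.Str.len s < PySem.Str.len m)) then
        some s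
      else shortest)
    none
  match shortest with
  | some s => s
  | none => ""

-- ===== PORT B =====
-- letterCounts: Counter over the generator (c for c in strVal.lower() if c.isalpha())
def letterCountsB (strVal : String) : PySem.Dict Char Int :=
  PySem.Dict.counter (((PySem.Str.lower strVal).toList).filter PySem.Str.isalpha)

-- all(candidateCounts[c] >= i for c, i in targetCounts.items())
def coversB (targetCounts : PySem.Dict Char Int) (s : String) : Bool :=
  let candidateCounts := letterCountsB s
  targetCounts.items.all (fun p => decide (p.2 ≤ candidateCounts.getD p.1 0))

-- the for-loop with early return over the sorted list; '' if it falls through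
def firstMatchB (targetCounts : PySem.Dict Char Int) : List String → String
  | [] => ""
  | s :: rest => if coversB targetCounts s then s else firstMatchB targetCounts rest

def completingWord_alt (targetStr : String) (candidateStrs : List String) : String :=
  let targetCounts := letterCountsB targetStr
  firstMatchB targetCounts (PySem.List.sorted candidateStrs (fun s => PySem.Str.len s))

-- ===== PRECONDITION & SPEC =====
def Spec_completingWord (targetStr : String) (candidateStrs : List String) (out : String) : Prop := out = completingWord_alt targetStr candidateStrs
instance (targetStr : String) (candidateStrs : List String) (out : String) : Decidable (Spec_completingWord targetStr candidateStrs out) := by unfold Spec_completingWord; infer_instance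

-- ===== CLAIM (what is proved, stated in full; the proofs are below) =====
def Claim_equal_completingWord : Prop := ∀ (targetStr : String) (candidateStrs : List String), Dom_completingWord targetStr candidateStrs → Spec_completingWord targetStr candidateStrs (completingWord targetStr candidateStrs)

-- ===== LEMMAS AND PROOFS =====

-- A's letterCounts loop is Counter of the filtered lowered char list (B's letterCounts).
theorem letterCountsA_eq (s : String) : letterCountsA s = letterCountsB s := by
  rw [letterCountsA, letterCountsB, PySem.Dict.counter_eq_foldl, List.foldl_filter]

-- every count stored in a Counter's items is positive
theorem counter_items_pos {κ : Type} [BEq κ] [LawfulBEq κ] (xs : List κ)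
    (p : κ × Int) (hp : p ∈ (PySem.Dict.counter xs).items) : 1 ≤ p.2 := by
  rw [PySem.Dict.items_counter] at hp
  obtain ⟨k, hk, rfl⟩ := List.mem_map.1 hp
  have hx : k ∈ xs := (PySem.Set.mem_ofList xs k).1 hk
  have := List.count_pos_iff.2 hx
  simpa using this

-- `all` only looks at members
theorem all_congr_mem {α : Type} (l : List α) (f g : α → Bool)
    (h : ∀ x ∈ l, f x = g x) : l.all f = l.all g := by
  induction l with
  | nil => rfl
  | cons x t ih => simp only [List.all_cons, h x (by simp), ih (fun y hy => h y (by simp [hy]))]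

-- A's flag-setting inner loop is an `all`
theorem foldl_flag {α : Type} (bad : α → Bool) :
    ∀ (l : List α) (b : Bool),
      l.foldl (fun acc p => if bad p then false else acc) b = (b && l.all (fun p => !bad p)) := by
  intro l
  induction l with
  | nil => simp
  | cons x t ih =>
    intro b
    simp only [List.foldl_cons, List.all_cons, ih]
    cases hbx : bad x <;> simp

-- A's per-letter failure test is the negation of B's per-letter coverage test (counts are positive)
theorem test_eq (c : Char) (i : Int) (hi : 1 ≤ i) (s : String) :
    (!(!(letterCountsA s).contains c || decide ((letterCountsA s).getD c 0 < i)))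
      = decide (i ≤ (letterCountsB s).getD c 0) := by
  rw [letterCountsA_eq, letterCountsB, PySem.Dict.contains_counter, PySem.Dict.getD_counter]
  by_cases hc : c ∈ ((PySem.Str.lower s).toList.filter PySem.Str.isalpha)
  · have h1 : ((PySem.Str.lower s).toList.filter PySem.Str.isalpha).contains c = true := by
      simpa using hc
    simp only [h1, Bool.not_true, Bool.false_or, ← decide_not, Int.not_lt]
  · have h1 : ((PySem.Str.lower s).toList.filter PySem.Str.isalpha).contains c = false := by
      simpa using hc
    have h3 : ¬ (i ≤ ((List.count c ((PySem.Str.lower s).toList.filter PySem.Str.isalpha) : Nat) : Int)) := by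
      have h2 : List.count c ((PySem.Str.lower s).toList.filter PySem.Str.isalpha) = 0 := by
        simpa [List.count_eq_zero] using hc
      rw [h2]; omega
    simp only [h1, Bool.not_false, Bool.true_or, Bool.not_true, decide_eq_false h3]

-- find? through an insertion of a non-matching element
theorem find?_insertBy_neg {α : Type} (p : α → Bool) (before : α → α → Bool) (x : α)
    (hx : p x = false) :
    ∀ ys : List α, ((PySem.List.insertBy before x ys).find? p) = ys.find? p := by
  intro ys
  induction ys with
  | nil => simp [PySem.List.insertBy, List.find?, hx]
  | cons y t ih =>
    by_cases h : before x y = true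
    · simp [PySem.List.insertBy, h, List.find?, hx]
    · simp only [PySem.List.insertBy] at ih ⊢
      simp only [h]
      cases hpy : p y <;> simp [List.find?, hpy, ih]

-- find? through an insertion of a matching element into a length-sorted list
theorem find?_insertBy_pos (k : String → Int) (p : String → Bool) (x : String)
    (hx : p x = true) :
    ∀ ys : List String, ys.Pairwise (fun a b => k a ≤ k b) →
      ((PySem.List.insertBy (fun a b => decide (k a < k b)) x ys).find? p)
        = (match ys.find? p with
           | none => some x
           | some m => if k x < k m then some x else some m) := by
  intro ys
  induction ys with
  | nil => intro _; simp [PySem.List.insertBy, List.find?, hx]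
  | cons y t ih =>
    intro hpw
    rw [List.pairwise_cons] at hpw
    by_cases h : k x < k y
    · simp only [PySem.List.insertBy, decide_eq_true_eq, if_pos h]
      cases hpy : p y with
      | true => simp [List.find?, hx, hpy, h]
      | false =>
        simp only [List.find?, hx, hpy]
        cases hft : t.find? p with
        | none => simp
        | some m =>
          have hm : m ∈ t := List.mem_of_find?_eq_some hft
          have : k x < k m := lt_of_lt_of_le h (hpw.1 m hm)
          simp [this]
    · simp only [PySem.List.insertBy, decide_eq_true_eq, if_neg h]
      cases hpy : p y with
      | true => simp [List.find?, hpy, h]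
      | false =>
        simp only [List.find?, hpy]
        exact ih hpw.2

-- insertion keeps the list length-sorted
theorem pairwise_insertBy (k : String → Int) (x : String) :
    ∀ ys : List String, ys.Pairwise (fun a b => k a ≤ k b) →
      (PySem.List.insertBy (fun a b => decide (k a < k b)) x ys).Pairwise
        (fun a b => k a ≤ k b) := by
  intro ys
  induction ys with
  | nil => intro _; simp [PySem.List.insertBy]
  | cons y t ih =>
    intro hpw
    rw [List.pairwise_cons] at hpw
    by_cases h : k x < k y
    · simp only [PySem.List.insertBy, decide_eq_true_eq, if_pos h]
      refine List.pairwise_cons.2 ⟨?_, List.pairwise_cons.2 hpw⟩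
      intro z hz
      rcases List.mem_cons.1 hz with rfl | hz
      · exact le_of_lt h
      · exact le_of_lt (lt_of_lt_of_le h (hpw.1 z hz))
    · simp only [PySem.List.insertBy, decide_eq_true_eq, if_neg h]
      refine List.pairwise_cons.2 ⟨?_, ih hpw.2⟩
      intro z hz
      rcases (PySem.List.mem_insertBy _ x z t).1 hz with rfl | hz
      · exact le_of_not_gt h
      · exact hpw.1 z hz

-- the main loop correspondence: A's tracking fold over l, started from the first match of a
-- length-sorted ys, equals the first match of l insertion-sorted into ys
theorem loop_eq (k : String → Int) (p : String → Bool) :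
    ∀ (l ys : List String), ys.Pairwise (fun a b => k a ≤ k b) →
      l.foldl
        (fun acc s =>
          if p s &&
              (match acc with
               | none => true
               | some m => decide (k s < k m)) then some s
          else acc)
        (ys.find? p)
      = (l.foldl
          (fun acc x => PySem.List.insertBy (fun a b => decide (k a < k b)) x acc) ys).find? p := by
  intro l
  induction l with
  | nil => intro ys _; simp
  | cons s t ih =>
    intro ys hpw
    simp only [List.foldl_cons]
    have hstep :
        (if p s &&
            (match ys.find? p with
             | none => true
             | some m => decide (k s < k m)) then some s
         else ys.find? p)
          = (PySem.List.insertBy (fun a b => decide (k a < k b)) s ys).find? p := by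
      cases hps : p s with
      | false => simp [find?_insertBy_neg p _ s hps ys]
      | true =>
        rw [find?_insertBy_pos k p s hps ys hpw]
        cases hf : ys.find? p with
        | none => simp
        | some m => by_cases h : k s < k m <;> simp [h]
    rw [hstep, ih _ (pairwise_insertBy k s ys hpw)]

theorem firstMatchB_eq_find? (tc : PySem.Dict Char Int) :
    ∀ l : List String, firstMatchB tc l = (l.find? (coversB tc)).getD "" := by
  intro l
  induction l with
  | nil => simp [firstMatchB]
  | cons s t ih =>
    cases h : coversB tc s <;> simp [firstMatchB, List.find?, h, ih]

-- A's per-candidate test equals B's coverage test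
theorem isCandidate_eq (targetStr s : String) :
    ((letterCountsA targetStr).items.foldl
        (fun b p =>
          if !(letterCountsA s).contains p.1 || (letterCountsA s).getD p.1 0 < p.2 then false
          else b)
        true)
      = coversB (letterCountsB targetStr) s := by
  rw [foldl_flag, Bool.true_and, coversB]
  rw [letterCountsA_eq targetStr, letterCountsB]
  apply all_congr_mem
  intro q hq
  have hpos : (1 : Int) ≤ q.2 := counter_items_pos _ q hq
  simpa using test_eq q.1 q.2 hpos s

-- ===== VERDICT (by name: the statement is the Claim_ definition above) =====
theorem completingWord_spec : Claim_equal_completingWord := by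
  intro targetStr candidateStrs _
  show completingWord targetStr candidateStrs = completingWord_alt targetStr candidateStrs
  simp only [completingWord, completingWord_alt]
  rw [firstMatchB_eq_find?, PySem.List.sorted_eq_foldl_insertBy]
  have hmain := loop_eq PySem.Str.len (coversB (letterCountsB targetStr)) candidateStrs []
    (by simp)
  simp only [List.find?_nil] at hmain
  have hsteps :
      (fun (shortest : Option String) s =>
          if ((letterCountsA targetStr).items.foldl
                (fun b p =>
                  if !(letterCountsA s).contains p.1 || (letterCountsA s).getD p.1 0 < p.2 then
                    false
                  else b) true) &&
              (match shortest with
               | none => true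
               | some m => decide (PySem.Str.len s < PySem.Str.len m)) then some s
          else shortest)
        = (fun (acc : Option String) s =>
            if coversB (letterCountsB targetStr) s &&
                (match acc with
                 | none => true
                 | some m => decide (PySem.Str.len s < PySem.Str.len m)) then some s
            else acc) := by
    funext acc s
    rw [isCandidate_eq]
  rw [hsteps, hmain]
  cases (candidateStrs.foldl
      (fun acc x =>
        PySem.List.insertBy (fun a b => decide (PySem.Str.len a < PySem.Str.len b)) x acc)
      []).find? (coversB (letterCountsB targetStr)) <;> simp
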